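-- pv_equiv track=rewrite | github.com/jinyongkwon/programmer_level_test | level1/과일장수.py | solution
-- ===== SOURCE A (Python) =====
-- def solution(k, m, score):
--     answer = 0
--     score.append(0)
--     score.sort(reverse=True)
--     box = []
--     for num in score:
--         if len(box) == m:
--             answer += min(box) * len(box)
--             box.clear()
--             box.append(num)
--         else:
--             box.append(num)
--     return answer
-- ===== SOURCE B (Python) =====
-- def solution(k, m, score):
--     # Same observable in-place mutation as the original: append sentinel 0, sort descending.
--     score.append(0)
--     score.sort(reverse=True)
--     # Each full box of m ends at index i = m-1, 2m-1, ...; its minimum is score[i].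
--     # A box is counted only if another element follows it, hence the stop len(score)-1.
--     return sum(score[i] for i in range(m - 1, len(score) - 1, m)) * m
-- ===== Notes on version B (the rewrite author's own statement) =====
-- stated objective: simpler
-- what changed: Replaces the box-accumulator loop (build each box, flush min(box)*len on overflow) with a direct strided sum over the descending-sorted list: the minimum of each counted box sits at index m-1, 2m-1, ..., so the answer is sum(score[i] for i in range(m-1, len(score)-1, m)) * m; the in-place append(0)+sort(reverse=True) mutation is kept.
import Mathlib
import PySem

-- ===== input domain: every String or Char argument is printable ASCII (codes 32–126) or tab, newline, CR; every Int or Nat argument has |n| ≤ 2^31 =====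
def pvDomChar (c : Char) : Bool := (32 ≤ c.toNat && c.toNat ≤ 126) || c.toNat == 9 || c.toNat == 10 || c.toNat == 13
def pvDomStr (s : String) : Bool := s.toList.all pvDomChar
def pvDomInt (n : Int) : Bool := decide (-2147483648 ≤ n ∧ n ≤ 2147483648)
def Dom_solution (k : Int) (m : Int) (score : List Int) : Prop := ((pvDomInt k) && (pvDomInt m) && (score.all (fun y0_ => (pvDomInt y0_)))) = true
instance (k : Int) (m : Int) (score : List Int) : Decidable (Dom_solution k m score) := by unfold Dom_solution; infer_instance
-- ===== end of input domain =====

-- ===== PORT A =====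
-- A-side helper: the loop body (state = (answer, box)); min([]) (Python ValueError,
-- reachable only when m = 0) is rendered as .getD 0 — m = 0 is excluded by Pre_solution.
def pvStep (m : Int) (st : Int × List Int) (num : Int) : Int × List Int :=
  if ((st.2.length : Int) = m) then
    (st.1 + (PySem.List.min? st.2 (fun x => x)).getD 0 * (st.2.length : Int), [num])
  else
    (st.1, st.2 ++ [num])

def solution (k : Int) (m : Int) (score : List Int) : Int :=
  let score := score ++ [0]
  let score := PySem.List.sorted score (fun x => x) true
  (score.foldl (pvStep m) (0, [])).1

-- ===== PORT B =====
-- B-side: strided sum over box-boundary indices of the sorted list; score[i] (which could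
-- raise IndexError in Python) is pyGetD with default 0 — the indices produced by the range
-- are always in bounds, so this is exact.
def solution_alt (k : Int) (m : Int) (score : List Int) : Int :=
  let score := score ++ [0]
  let score := PySem.List.sorted score (fun x => x) true
  ((PySem.List.pyRange (m - 1) ((score.length : Int) - 1) m).map
      (fun i => PySem.List.pyGetD score i 0)).sum * m

-- ===== PRECONDITION & SPEC =====
-- Pre_ excludes only m = 0, on which A raises ValueError (min of an empty box); B also raises there (range step 0).
def Pre_solution (k : Int) (m : Int) (score : List Int) : Prop := m ≠ 0
instance (k : Int) (m : Int) (score : List Int) : Decidable (Pre_solution k m score) := by unfold Pre_solution; infer_instance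
def pvWitness_solution : Int × Int × List Int := (4, 3, [1, 2, 3, 1, 2, 3, 1])
def Spec_solution (k : Int) (m : Int) (score : List Int) (out : Int) : Prop := out = solution_alt k m score
instance (k : Int) (m : Int) (score : List Int) (out : Int) : Decidable (Spec_solution k m score out) := by unfold Spec_solution; infer_instance

-- ===== CLAIM (what is proved, stated in full; the proofs are below) =====
def Claim_equal_solution : Prop := ∀ (k : Int) (m : Int) (score : List Int), Dom_solution k m score → Pre_solution k m score → Spec_solution k m score (solution k m score)

-- ===== LEMMAS AND PROOFS =====

-- the chunk-wise value of A's loop on the sorted list: each full box of M followed by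
-- at least one more element contributes the last element of that box
def chunkG (M : Nat) (s : List Int) : Int :=
  if h : M = 0 ∨ s.length ≤ M then 0
  else (s.take M).getLastD 0 + chunkG M (s.drop M)
termination_by s.length
decreasing_by simp only [List.length_drop]; omega

theorem chunkG_zero {M : Nat} {s : List Int} (h : s.length ≤ M) : chunkG M s = 0 := by
  rw [chunkG, dif_pos (Or.inr h)]

theorem chunkG_step {M : Nat} {s : List Int} (hM : M ≠ 0) (h : M < s.length) :
    chunkG M s = (s.take M).getLastD 0 + chunkG M (s.drop M) := by
  rw [chunkG, dif_neg (by omega)]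

theorem pairwise_getLast_le (b : List Int) (hb : b ≠ [])
    (hp : b.Pairwise (fun x y => y ≤ x)) : ∀ y ∈ b, b.getLast hb ≤ y := by
  intro y hy
  obtain ⟨i, hi, rfl⟩ := List.getElem_of_mem hy
  rw [List.getLast_eq_getElem]
  rcases Nat.lt_or_ge i (b.length - 1) with h | h
  · exact List.pairwise_iff_getElem.1 hp i (b.length - 1) hi (by omega) h
  · have hieq : i = b.length - 1 := by
      have := List.length_pos_iff.2 hb
      omega
    subst hieq
    exact le_refl _

theorem minD_eq_getLastD (b : List Int) (hb : b ≠ [])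
    (hp : b.Pairwise (fun x y => y ≤ x)) :
    (PySem.List.min? b (fun x => x)).getD 0 = b.getLastD 0 := by
  cases h : PySem.List.min? b (fun x => x) with
  | none => exact absurd ((PySem.List.min?_eq_none_iff b _).1 h) hb
  | some mv =>
    rw [List.getLastD_eq_getLast?, List.getLast?_eq_getLast hb]
    simp only [Option.getD_some]
    exact le_antisymm
      (PySem.List.min?_isMin h _ (List.getLast_mem hb))
      (pairwise_getLast_le b hb hp mv (PySem.List.min?_mem h))

-- A's loop, generalized: starting from a nonempty box of size ≤ m
theorem foldl_pvStep (m : Int) (hm : 0 < m) :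
    ∀ (l b : List Int) (a : Int), b ≠ [] → (b.length : Int) ≤ m →
      (b ++ l).Pairwise (fun x y => y ≤ x) →
      (l.foldl (pvStep m) (a, b)).1 = a + m * chunkG m.toNat (b ++ l) := by
  intro l
  induction l with
  | nil =>
    intro b a hb hble hpw
    rw [List.foldl_nil, List.append_nil, chunkG_zero (by omega)]
    ring
  | cons x xs ih =>
    intro b a hb hble hpw
    have hpwb : b.Pairwise (fun p q : Int => q ≤ p) := (List.pairwise_append.1 hpw).1
    have hpwx : (x :: xs).Pairwise (fun p q : Int => q ≤ p) := (List.pairwise_append.1 hpw).2.1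
    by_cases hfull : (b.length : Int) = m
    · have hstep : pvStep m (a, b) x
          = (a + (PySem.List.min? b (fun x => x)).getD 0 * (b.length : Int), [x]) := by
        unfold pvStep; rw [if_pos hfull]
      rw [List.foldl_cons, hstep,
        ih [x] _ (by simp) (by simp; omega) (by simpa using hpwx),
        minD_eq_getLastD b hb hpwb, List.singleton_append]
      have hblen : b.length = m.toNat := by omega
      have hchunk : chunkG m.toNat (b ++ x :: xs)
          = b.getLastD 0 + chunkG m.toNat (x :: xs) := by
        rw [chunkG_step (by omega) (by simp; omega),
          List.take_left' hblen, List.drop_left' hblen]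
      rw [hchunk, hfull]
      ring
    · have hstep : pvStep m (a, b) x = (a, b ++ [x]) := by
        unfold pvStep; rw [if_neg hfull]
      rw [List.foldl_cons, hstep,
        ih (b ++ [x]) a (by simp) (by simp; omega)
          (by rw [List.append_assoc]; simpa using hpw),
        List.append_assoc]
      simp

theorem foldl_pvStep_neg (m : Int) (hm : m < 0) :
    ∀ (l b : List Int) (a : Int), (l.foldl (pvStep m) (a, b)).1 = a := by
  intro l
  induction l with
  | nil => intro b a; rfl
  | cons x xs ih =>
    intro b a
    have hstep : pvStep m (a, b) x = (a, b ++ [x]) := by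
      unfold pvStep; rw [if_neg (by simp; omega)]
    rw [List.foldl_cons, hstep, ih]

theorem pyRange_pos_nil_neg {a b st : Int} (hs : st < 0) (h : a ≤ b) :
    PySem.List.pyRange a b st = [] := by
  unfold PySem.List.pyRange
  rw [if_neg (by omega)]
  simp only [if_neg (by omega : ¬ (0:Int) < st), if_neg (by omega : ¬ b < a)]
  simp

theorem pyRange_pos_nil {a b st : Int} (hs : 0 < st) (h : b ≤ a) :
    PySem.List.pyRange a b st = [] := by
  rw [PySem.List.pyRange_of_pos a b hs, if_neg (by omega)]
  simp

theorem pyRange_pos_cons {a b st : Int} (hs : 0 < st) (h : a < b) :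
    PySem.List.pyRange a b st = a :: PySem.List.pyRange (a + st) b st := by
  rw [PySem.List.pyRange_of_pos a b hs, PySem.List.pyRange_of_pos (a + st) b hs, if_pos h]
  have hcount : ((b - a + st - 1) / st).toNat
      = (if a + st < b then ((b - (a + st) + st - 1) / st).toNat else 0) + 1 := by
    by_cases h2 : a + st < b
    · rw [if_pos h2]
      have he : b - a + st - 1 = (b - (a + st) + st - 1) + 1 * st := by ring
      rw [he, Int.add_mul_ediv_right _ _ (by omega)]
      have hpos : 0 ≤ (b - (a + st) + st - 1) / st := Int.ediv_nonneg (by omega) (by omega)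
      omega
    · rw [if_neg h2]
      have he : b - a + st - 1 = (b - a - 1) + 1 * st := by ring
      rw [he, Int.add_mul_ediv_right _ _ (by omega),
        Int.ediv_eq_zero_of_lt (by omega) (by omega)]
      simp
  rw [hcount, List.range_succ_eq_map, List.map_cons, List.map_map]
  congr 1
  · simp
  · apply List.map_congr_left
    intro kk _
    simp only [Function.comp_apply, Nat.succ_eq_add_one]
    push_cast
    ring

theorem pyRange_shift {a b st : Int} (hs : 0 < st) :
    PySem.List.pyRange (a + st) b st = (PySem.List.pyRange a (b - st) st).map (· + st) := by
  rw [PySem.List.pyRange_of_pos (a + st) b hs, PySem.List.pyRange_of_pos a (b - st) hs,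
    List.map_map]
  have hc : (if a + st < b then ((b - (a + st) + st - 1) / st).toNat else 0)
      = (if a < b - st then ((b - st - a + st - 1) / st).toNat else 0) := by
    by_cases h2 : a + st < b
    · rw [if_pos h2, if_pos (by omega)]
      have : b - (a + st) + st - 1 = b - st - a + st - 1 := by ring
      rw [this]
    · rw [if_neg h2, if_neg (by omega)]
  rw [hc]
  apply List.map_congr_left
  intro kk _
  simp only [Function.comp_apply]
  ring

-- B's strided sum equals the chunk-wise value
theorem sum_stride (m : Int) (hm : 0 < m) :
    ∀ (n : Nat) (s : List Int), s.length = n →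
      ((PySem.List.pyRange (m - 1) ((s.length : Int) - 1) m).map
        (fun i => PySem.List.pyGetD s i 0)).sum = chunkG m.toNat s := by
  intro n
  induction n using Nat.strong_induction_on with
  | _ n ih =>
    intro s hn
    by_cases hsm : s.length ≤ m.toNat
    · rw [pyRange_pos_nil hm (by omega), chunkG_zero hsm]
      simp
    · have hM0 : m.toNat ≠ 0 := by omega
      have hMlt : m.toNat < s.length := by omega
      rw [chunkG_step hM0 hMlt, pyRange_pos_cons hm (by omega),
        List.map_cons, List.sum_cons]
      congr 1
      · -- head: s[m-1] is the last element of the first box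
        have hne : s.take m.toNat ≠ [] := by
          have hlt : (s.take m.toNat).length = m.toNat := by
            simp [List.length_take]
            omega
          intro hcon
          rw [hcon] at hlt
          simp at hlt
          omega
        rw [PySem.List.pyGetD_eq_getElem s 0 (by omega) (by omega),
          List.getLastD_eq_getLast?, List.getLast?_eq_getLast hne,
          List.getLast_eq_getElem, List.getElem_take]
        congr 1
        simp [List.length_take]
        omega
      · -- tail: shift the range by m and recurse on the dropped list
        rw [pyRange_shift hm, List.map_map]
        have hmap : ∀ i ∈ PySem.List.pyRange (m - 1) ((s.length : Int) - 1 - m) m,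
            ((fun i => PySem.List.pyGetD s i 0) ∘ (· + m)) i
              = PySem.List.pyGetD (s.drop m.toNat) i 0 := by
          intro i hi
          have hmem := (PySem.List.mem_pyRange_iff_of_pos hm i).1 hi
          simp only [Function.comp_apply]
          rw [PySem.List.pyGetD_eq_getElem s 0 (by omega) (by omega),
            PySem.List.pyGetD_eq_getElem (s.drop m.toNat) 0 (by omega)
              (by simp [List.length_drop]; omega),
            List.getElem_drop]
          congr 1
          omega
        rw [List.map_congr_left hmap]
        have hlen : ((s.drop m.toNat).length : Int) - 1 = (s.length : Int) - 1 - m := by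
          simp [List.length_drop]
          omega
        rw [← hlen]
        exact ih (s.drop m.toNat).length (by simp [List.length_drop]; omega) _ rfl

-- ===== VERDICT (by name: the statement is the Claim_ definition above) =====
theorem solution_spec : Claim_equal_solution := by
  intro k m score _ hpre
  unfold Spec_solution solution solution_alt
  dsimp only
  set s := PySem.List.sorted (score ++ [0]) (fun x => x) true with hs
  have hlen : 1 ≤ s.length := by
    have hne : s ≠ [] := by
      rw [hs, Ne, PySem.List.sorted_eq_nil_iff]; simp
    have := List.length_pos_iff.2 hne
    omega
  rcases lt_trichotomy m 0 with hm | hm | hm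
  · rw [foldl_pvStep_neg m hm, pyRange_pos_nil_neg hm (by omega)]
    simp
  · exact absurd hm hpre
  · rw [sum_stride m hm s.length s rfl]
    obtain ⟨x, xs, hsc⟩ : ∃ x xs, s = x :: xs := by
      cases h : s with
      | nil => rw [h] at hlen; simp at hlen
      | cons x xs => exact ⟨x, xs, rfl⟩
    have hpw : (x :: xs).Pairwise (fun p q : Int => q ≤ p) := by
      rw [← hsc, hs]; exact PySem.List.sorted_pairwise_rev _ _
    rw [hsc]
    have hfirst : (x :: xs).foldl (pvStep m) (0, []) = xs.foldl (pvStep m) (0, [x]) := by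
      rw [List.foldl_cons]
      congr 1
      unfold pvStep; rw [if_neg (by simp; omega)]
      simp
    rw [hfirst, foldl_pvStep m hm xs [x] 0 (by simp) (by simp; omega) (by simpa using hpw),
      List.singleton_append]
    ring
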